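-- pv_equiv track=rewrite | github.com/harvard-hbs/team-formation | team_formation/team_assignment.py | calc_team_sizes
-- ===== SOURCE A (Python) =====
-- def calc_team_sizes(pop_size, target_size, less_than=True):
--     if less_than:
--         num_teams = (pop_size + target_size - 1) // target_size
--         base_team_size = pop_size // num_teams
--         extra_members = pop_size % num_teams
--         team_sizes = [
--             (base_team_size + 1) if (i < extra_members) else base_team_size
--             for i in range(num_teams)
--         ]
--     else:
--         num_teams = pop_size // target_size
--         base_team_size = pop_size // num_teams
--         extra_members = pop_size % num_teams
--         team_sizes = [
--             base_team_size if (i >= extra_members) else (base_team_size + 1)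
--             for i in range(num_teams)
--         ]
--     return team_sizes
-- ===== SOURCE B (Python) =====
-- def calc_team_sizes(pop_size, target_size, less_than=True):
--     if less_than:
--         num_teams = (pop_size + target_size - 1) // target_size
--     else:
--         num_teams = pop_size // target_size
--     team_sizes = []
--     remaining_pop = pop_size
--     remaining_teams = num_teams
--     while remaining_teams > 0:
--         size = (remaining_pop + remaining_teams - 1) // remaining_teams
--         team_sizes.append(size)
--         remaining_pop -= size
--         remaining_teams -= 1
--     return team_sizes
-- ===== Notes on version B (the rewrite author's own statement) =====
-- stated objective: simpler
-- what changed: A's two duplicated branches, each computing base size and extra members in closed form and mapping an if over range(num_teams), are collapsed into one greedy loop that repeatedly takes size = ceil(remaining_pop / remaining_teams) and subtracts it; only num_teams is computed per branch.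
import Mathlib
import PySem

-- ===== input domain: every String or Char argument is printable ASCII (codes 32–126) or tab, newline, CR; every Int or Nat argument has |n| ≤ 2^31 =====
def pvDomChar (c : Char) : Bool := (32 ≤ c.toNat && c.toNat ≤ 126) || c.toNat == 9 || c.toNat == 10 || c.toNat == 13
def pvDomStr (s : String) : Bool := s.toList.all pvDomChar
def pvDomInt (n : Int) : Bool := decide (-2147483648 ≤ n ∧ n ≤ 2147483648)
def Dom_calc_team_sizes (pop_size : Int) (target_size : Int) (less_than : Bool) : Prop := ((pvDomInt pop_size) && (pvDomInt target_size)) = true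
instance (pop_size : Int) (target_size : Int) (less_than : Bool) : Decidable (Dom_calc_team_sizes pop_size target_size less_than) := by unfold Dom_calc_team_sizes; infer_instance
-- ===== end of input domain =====

-- B replaces A's two duplicated base/extra closed-form branches by one greedy loop
-- (size = ceil(remaining_pop / remaining_teams) per team); objective: simpler, same cost.

-- ===== PORT A =====
def calc_team_sizes (pop_size : Int) (target_size : Int) (less_than : Bool) : List Int :=
  if less_than then
    let num_teams := PySem.Int.floordiv (pop_size + target_size - 1) target_size
    let base_team_size := PySem.Int.floordiv pop_size num_teams
    let extra_members := PySem.Int.mod pop_size num_teams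
    (PySem.List.pyRange 0 num_teams 1).map
      (fun i => if i < extra_members then base_team_size + 1 else base_team_size)
  else
    let num_teams := PySem.Int.floordiv pop_size target_size
    let base_team_size := PySem.Int.floordiv pop_size num_teams
    let extra_members := PySem.Int.mod pop_size num_teams
    (PySem.List.pyRange 0 num_teams 1).map
      (fun i => if extra_members ≤ i then base_team_size else base_team_size + 1)

-- ===== PORT B =====
-- the while-loop of Source B: remaining_teams counts down to 0 (Python Int counter, here its toNat)
def altLoop (remaining_pop : Int) : Nat → List Int
  | 0 => []
  | t + 1 =>
    let n : Int := (t : Int) + 1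
    let size := PySem.Int.floordiv (remaining_pop + n - 1) n
    size :: altLoop (remaining_pop - size) t

def calc_team_sizes_alt (pop_size : Int) (target_size : Int) (less_than : Bool) : List Int :=
  let num_teams :=
    if less_than then PySem.Int.floordiv (pop_size + target_size - 1) target_size
    else PySem.Int.floordiv pop_size target_size
  altLoop pop_size num_teams.toNat

-- ===== PRECONDITION & SPEC =====
-- Pre_ excludes exactly the inputs where Python A raises ZeroDivisionError:
-- target_size == 0, or num_teams == 0 (pop_size // num_teams divides by zero).
def Pre_calc_team_sizes (pop_size : Int) (target_size : Int) (less_than : Bool) : Prop :=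
  target_size ≠ 0 ∧
    (if less_than then PySem.Int.floordiv (pop_size + target_size - 1) target_size ≠ 0
     else PySem.Int.floordiv pop_size target_size ≠ 0)
instance (pop_size : Int) (target_size : Int) (less_than : Bool) : Decidable (Pre_calc_team_sizes pop_size target_size less_than) := by unfold Pre_calc_team_sizes; infer_instance

def pvWitness_calc_team_sizes : Int × Int × Bool := (7, 3, true)

def Spec_calc_team_sizes (pop_size : Int) (target_size : Int) (less_than : Bool) (out : List Int) : Prop := out = calc_team_sizes_alt pop_size target_size less_than
instance (pop_size : Int) (target_size : Int) (less_than : Bool) (out : List Int) : Decidable (Spec_calc_team_sizes pop_size target_size less_than out) := by unfold Spec_calc_team_sizes; infer_instance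

-- ===== CLAIM (what is proved, stated in full; the proofs are below) =====
def Claim_equal_calc_team_sizes : Prop := ∀ (pop_size : Int) (target_size : Int) (less_than : Bool), Dom_calc_team_sizes pop_size target_size less_than → Pre_calc_team_sizes pop_size target_size less_than → Spec_calc_team_sizes pop_size target_size less_than (calc_team_sizes pop_size target_size less_than)

-- ===== LEMMAS AND PROOFS =====

-- the greedy loop over n teams produces the base/extra distribution of pop over n
lemma altLoop_eq (n : Nat) (pop : Int) (hn : 0 < n) :
    altLoop pop n =
      List.replicate (PySem.Int.mod pop (n : Int)).toNat (PySem.Int.floordiv pop (n : Int) + 1)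
        ++ List.replicate (n - (PySem.Int.mod pop (n : Int)).toNat) (PySem.Int.floordiv pop (n : Int)) := by
  induction n generalizing pop with
  | zero => omega
  | succ t ih =>
    simp only [Nat.cast_add, Nat.cast_one]
    have hN : (0 : Int) < (t : Int) + 1 := by omega
    set q := PySem.Int.floordiv pop ((t : Int) + 1) with hq
    set r := PySem.Int.mod pop ((t : Int) + 1) with hr
    have hqr : q * ((t : Int) + 1) + r = pop := PySem.Int.floordiv_mul_add_mod pop _
    have hr0 : 0 ≤ r := PySem.Int.mod_nonneg pop hN
    have hrN : r < (t : Int) + 1 := PySem.Int.mod_lt pop hN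
    have e1 : q * ((t : Int) + 1) = q * (t : Int) + q := by ring
    have e2 : (q + 1) * ((t : Int) + 1) = q * ((t : Int) + 1) + ((t : Int) + 1) := by ring
    have e3 : (q + 1 + 1) * ((t : Int) + 1) = q * ((t : Int) + 1) + 2 * ((t : Int) + 1) := by ring
    have e4 : (q + 1) * (t : Int) = q * (t : Int) + (t : Int) := by ring
    have hsize : PySem.Int.floordiv (pop + ((t : Int) + 1) - 1) ((t : Int) + 1)
        = if r = 0 then q else q + 1 := by
      by_cases h0 : r = 0
      · rw [if_pos h0, PySem.Int.floordiv_eq_iff_of_pos hN]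
        constructor <;> linarith
      · have hr1 : 1 ≤ r := by omega
        rw [if_neg h0, PySem.Int.floordiv_eq_iff_of_pos hN]
        constructor <;> linarith
    show (PySem.Int.floordiv (pop + ((t : Int) + 1) - 1) ((t : Int) + 1))
        :: altLoop (pop - PySem.Int.floordiv (pop + ((t : Int) + 1) - 1) ((t : Int) + 1)) t = _
    rw [hsize]
    by_cases h0 : r = 0
    · -- size = q ; remaining pop = q * t
      rw [if_pos h0]
      rcases Nat.eq_zero_or_pos t with ht | ht
      · subst ht
        simp only [altLoop]
        rw [h0]
        simp
      · have hTpos : (0 : Int) < (t : Int) := by omega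
        have hfd : PySem.Int.floordiv (pop - q) (t : Int) = q := by
          rw [PySem.Int.floordiv_eq_iff_of_pos hTpos]
          constructor <;> linarith
        have hmd : PySem.Int.mod (pop - q) (t : Int) = 0 := by
          have h := PySem.Int.floordiv_mul_add_mod (pop - q) (t : Int)
          rw [hfd] at h
          linarith
        rw [ih (pop - q) ht, hfd, hmd, h0]
        simp [List.replicate_succ]
    · -- size = q + 1 ; remaining pop = q * t + (r - 1)
      rw [if_neg h0]
      have hr1 : 1 ≤ r := by omega
      have ht : 0 < t := by
        rcases Nat.eq_zero_or_pos t with h | h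
        · subst h; simp at hrN; omega
        · exact h
      have hTpos : (0 : Int) < (t : Int) := by omega
      have hfd : PySem.Int.floordiv (pop - (q + 1)) (t : Int) = q := by
        rw [PySem.Int.floordiv_eq_iff_of_pos hTpos]
        constructor <;> linarith
      have hmd : PySem.Int.mod (pop - (q + 1)) (t : Int) = r - 1 := by
        have h := PySem.Int.floordiv_mul_add_mod (pop - (q + 1)) (t : Int)
        rw [hfd] at h
        linarith
      rw [ih (pop - (q + 1)) ht, hfd, hmd]
      have h1 : t + 1 - r.toNat = t - (r - 1).toNat := by omega
      have h2 : r.toNat = (r - 1).toNat + 1 := by omega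
      rw [h1, h2, List.replicate_succ, List.cons_append]

lemma map_range_ite_nat (m k : Nat) (hk : k ≤ m) (x y : Int) :
    (List.range m).map (fun i => if i < k then x else y)
      = List.replicate k x ++ List.replicate (m - k) y := by
  obtain ⟨d, rfl⟩ : ∃ d, m = k + d := ⟨m - k, by omega⟩
  rw [List.range_add, List.map_append, List.map_map]
  congr 1
  · rw [List.map_congr_left (g := fun _ => x)
      (fun i hi => if_pos (List.mem_range.mp hi))]
    simp
  · rw [List.map_congr_left (g := fun _ => y)
      (fun i _ => by simp only [Function.comp_apply]; rw [if_neg (by omega)])]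
    simp

lemma map_range_ite_int (m : Nat) (r : Int) (hr0 : 0 ≤ r) (hrm : r ≤ (m : Int)) (x y : Int) :
    (List.range m).map (fun k : Nat => if (k : Int) < r then x else y)
      = List.replicate r.toNat x ++ List.replicate (m - r.toNat) y := by
  rw [List.map_congr_left (g := fun k : Nat => if k < r.toNat then x else y)
      (by intro k _
          dsimp only
          by_cases h : (k : Int) < r
          · rw [if_pos h, if_pos (by omega)]
          · rw [if_neg h, if_neg (by omega)])]
  exact map_range_ite_nat m r.toNat (by omega) x y

-- A's comprehension over a branch with num_teams = n equals B's greedy loop, for any n ≠ 0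
lemma branch_eq (pop n : Int) (hn : n ≠ 0) :
    (PySem.List.pyRange 0 n 1).map
        (fun i => if i < PySem.Int.mod pop n then PySem.Int.floordiv pop n + 1
                  else PySem.Int.floordiv pop n)
      = altLoop pop n.toNat := by
  rcases lt_or_gt_of_ne hn with hneg | hpos
  · rw [PySem.List.pyRange_one_eq_nil (by omega)]
    have h0 : n.toNat = 0 := by omega
    rw [h0]
    rfl
  · obtain ⟨m, rfl⟩ : ∃ m : Nat, n = (m : Int) := ⟨n.toNat, by omega⟩
    have hm : 0 < m := by exact_mod_cast hpos
    rw [Int.toNat_natCast, altLoop_eq m pop hm, PySem.List.pyRange_one]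
    have harg : ((m : Int) - 0).toNat = m := by omega
    rw [harg, List.map_map]
    have hr0 : 0 ≤ PySem.Int.mod pop (m : Int) := PySem.Int.mod_nonneg pop hpos
    have hrm : PySem.Int.mod pop (m : Int) ≤ (m : Int) := (PySem.Int.mod_lt pop hpos).le
    rw [← map_range_ite_int m (PySem.Int.mod pop (m : Int)) hr0 hrm]
    apply List.map_congr_left
    intro k _
    simp [Function.comp]

-- ===== VERDICT (by name: the statement is the Claim_ definition above) =====
theorem calc_team_sizes_spec : Claim_equal_calc_team_sizes := by
  intro pop_size target_size less_than _ hpre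
  obtain ⟨ht, hnum⟩ := hpre
  unfold Spec_calc_team_sizes calc_team_sizes calc_team_sizes_alt
  cases less_than with
  | true =>
    simp only [if_true] at hnum ⊢
    exact branch_eq pop_size _ hnum
  | false =>
    simp only [Bool.false_eq_true, if_false] at hnum ⊢
    rw [List.map_congr_left
        (g := fun i => if i < PySem.Int.mod pop_size (PySem.Int.floordiv pop_size target_size)
                       then PySem.Int.floordiv pop_size (PySem.Int.floordiv pop_size target_size) + 1
                       else PySem.Int.floordiv pop_size (PySem.Int.floordiv pop_size target_size))
        (by intro i _; dsimp only; split_ifs <;> omega)]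
    exact branch_eq pop_size _ hnum
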